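-- pv_equiv track=rewrite | github.com/AP-MI-2021/seminar-2-ioana637 | pb2.py | determinare_cea_mai_lunga_secv
-- ===== SOURCE A (Python) =====
-- def nr_div_10(nr):
--     '''
--     Verifica ca nr sa fie divizbil cu 10
--     :param nr: nr intreg
--     :return: True daca nr e divizibil cu 10, False altfel
--     '''
--     return nr % 10 == 0
--
-- def determinare_cea_mai_lunga_secv(lista):
--     '''
--     Determinarea secventa cea mai lunga cu prop ca nr sunt divizibile cu 10
--     :param lista: lista de nr intregi
--     :return: rez lista care reprezinta secventa de lungime maxima
--     cu prop ca nr sunt divizibile cu 10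
--     '''
--     rez = []  # rezultatul final
--     temp = []  # solutia curenta
--     for x in lista:  # foreach
--         if nr_div_10(x):
--             temp.append(x)
--         else:
--             if (len(temp) > len(rez)):
--                 rez = temp[:]
--             temp.clear()
--     if (len(temp) > len(rez)):
--         rez = temp[:]
--     return rez
-- ===== SOURCE B (Python) =====
-- from itertools import groupby
--
-- def determinare_cea_mai_lunga_secv(lista):
--     runs = [list(g) for k, g in groupby(lista, key=lambda x: x % 10 == 0) if k]
--     return max(runs, key=len, default=[])
-- ===== Notes on version B (the rewrite author's own statement) =====
-- stated objective: idiomatic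
-- what changed: Replaces the single-pass temp-buffer accumulator with a group-then-select decomposition: itertools.groupby splits the list into maximal runs of multiples of 10 and max(..., key=len) with an empty default picks the first longest run.
import Mathlib
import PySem

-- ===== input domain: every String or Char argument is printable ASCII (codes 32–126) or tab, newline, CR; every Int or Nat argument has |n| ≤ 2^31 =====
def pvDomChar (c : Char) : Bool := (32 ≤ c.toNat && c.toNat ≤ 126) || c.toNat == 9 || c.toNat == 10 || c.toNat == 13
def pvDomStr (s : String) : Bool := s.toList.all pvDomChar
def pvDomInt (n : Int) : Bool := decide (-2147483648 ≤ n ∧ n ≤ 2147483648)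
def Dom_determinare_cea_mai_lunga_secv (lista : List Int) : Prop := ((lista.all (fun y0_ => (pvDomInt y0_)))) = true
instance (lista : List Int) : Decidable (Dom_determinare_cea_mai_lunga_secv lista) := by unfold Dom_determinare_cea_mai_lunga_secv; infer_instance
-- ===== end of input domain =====

-- B replaces A's temp-buffer accumulator with a group-into-maximal-runs-then-pick-first-longest decomposition (idiomatic; same cost).

-- ===== PORT A =====
def nr_div_10 (nr : Int) : Bool := PySem.Int.mod nr 10 == 0

-- one loop iteration over state (rez, temp)
def pvStepA (s : List Int × List Int) (x : Int) : List Int × List Int :=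
  if nr_div_10 x then (s.1, s.2 ++ [x])
  else (if s.2.length > s.1.length then s.2 else s.1, [])

def determinare_cea_mai_lunga_secv (lista : List Int) : List Int :=
  let s := lista.foldl pvStepA ([], [])
  if s.2.length > s.1.length then s.2 else s.1

-- ===== PORT B =====
-- groupby(lista, key=...) keeping only the key=True groups: maximal runs of
-- multiples of 10, collected with a reversed current-group accumulator.
def pvRuns : List Int → List Int → List (List Int)
  | [], cur => if cur.isEmpty then [] else [cur.reverse]
  | x :: xs, cur =>
    if nr_div_10 x then pvRuns xs (x :: cur)
    else if cur.isEmpty then pvRuns xs [] else cur.reverse :: pvRuns xs []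

-- max(runs, key=len, default=[]): first run of maximal length, [] if none
def pvMaxByLen : List (List Int) → List Int
  | [] => []
  | r :: rs => rs.foldl (fun best g => if g.length > best.length then g else best) r

def determinare_cea_mai_lunga_secv_alt (lista : List Int) : List Int :=
  pvMaxByLen (pvRuns lista [])

-- ===== PRECONDITION & SPEC =====
def Spec_determinare_cea_mai_lunga_secv (lista : List Int) (out : List Int) : Prop := out = determinare_cea_mai_lunga_secv_alt lista
instance (lista : List Int) (out : List Int) : Decidable (Spec_determinare_cea_mai_lunga_secv lista out) := by unfold Spec_determinare_cea_mai_lunga_secv; infer_instance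

-- ===== CLAIM (what is proved, stated in full; the proofs are below) =====
def Claim_equal_determinare_cea_mai_lunga_secv : Prop := ∀ (lista : List Int), Dom_determinare_cea_mai_lunga_secv lista → Spec_determinare_cea_mai_lunga_secv lista (determinare_cea_mai_lunga_secv lista)

-- ===== LEMMAS AND PROOFS =====

def pvBestFold (rez : List Int) (rs : List (List Int)) : List Int :=
  rs.foldl (fun best g => if g.length > best.length then g else best) rez

theorem pvInvariant (l : List Int) : ∀ (rez cur : List Int),
    (let s := l.foldl pvStepA (rez, cur.reverse);
     if s.2.length > s.1.length then s.2 else s.1) = pvBestFold rez (pvRuns l cur) := by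
  induction l with
  | nil =>
    intro rez cur
    simp only [List.foldl, pvRuns, pvBestFold]
    cases cur with
    | nil => simp
    | cons c cs => simp [List.foldl]
  | cons x xs ih =>
    intro rez cur
    simp only [List.foldl, pvRuns, pvStepA]
    by_cases h : nr_div_10 x = true
    · simp only [h, if_true]
      have : cur.reverse ++ [x] = (x :: cur).reverse := by simp
      rw [this]
      exact ih rez (x :: cur)
    · simp only [h]
      cases cur with
      | nil =>
        simpa using ih rez []
      | cons c cs =>
        have hne : ((c :: cs).isEmpty) = false := rfl
        simp only [Bool.false_eq_true, if_false, hne]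
        have := ih (if (c :: cs).reverse.length > rez.length then (c :: cs).reverse else rez) []
        simp only [List.reverse_nil] at this
        rw [this]
        simp [pvBestFold, List.foldl]

theorem pvMaxByLen_eq_bestFold (rs : List (List Int)) : pvMaxByLen rs = pvBestFold [] rs := by
  cases rs with
  | nil => rfl
  | cons r rt =>
    simp only [pvMaxByLen, pvBestFold, List.foldl]
    by_cases h : r.length > ([] : List Int).length
    · have h' : 0 < r.length := by simpa using h
      simp [h']
    · have hr : r = [] := by
        cases r with
        | nil => rfl
        | cons a as => simp at h
      simp [hr]

-- ===== VERDICT (by name: the statement is the Claim_ definition above) =====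
theorem determinare_cea_mai_lunga_secv_spec : Claim_equal_determinare_cea_mai_lunga_secv := by
  intro lista _
  unfold Spec_determinare_cea_mai_lunga_secv determinare_cea_mai_lunga_secv determinare_cea_mai_lunga_secv_alt
  rw [pvMaxByLen_eq_bestFold]
  have := pvInvariant lista [] []
  simpa using this
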